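-- pv_equiv track=rewrite | github.com/shahinmnm/Poker-Bot | pokerapp/menu_state.py | get_breadcrumb_path
-- ===== SOURCE A (Python) =====
-- from enum import Enum
-- from typing import Any, Dict, List, Optional
--
-- class MenuLocation(str, Enum):
--     """Known menu locations for bot navigation."""
--
--     MAIN_MENU = "main"
--     PRIVATE_GAME_SETUP = "private_setup"
--     PRIVATE_GAME_VIEW = "private_view"
--     STAKE_SELECTION = "stake_select"
--     PLAYER_MANAGEMENT = "player_mgmt"
--     GROUP_GAME_SETUP = "group_setup"
--     GROUP_GAME_VIEW = "group_view"
--     SETTINGS = "settings"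
--     LANGUAGE_SELECT = "lang_select"
--
-- MENU_HIERARCHY: Dict[MenuLocation, Optional[MenuLocation]] = {
--     MenuLocation.PRIVATE_GAME_SETUP: MenuLocation.MAIN_MENU,
--     MenuLocation.STAKE_SELECTION: MenuLocation.PRIVATE_GAME_SETUP,
--     MenuLocation.PLAYER_MANAGEMENT: MenuLocation.PRIVATE_GAME_VIEW,
--     MenuLocation.GROUP_GAME_SETUP: MenuLocation.MAIN_MENU,
--     MenuLocation.SETTINGS: MenuLocation.MAIN_MENU,
--     MenuLocation.LANGUAGE_SELECT: MenuLocation.SETTINGS,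
--     MenuLocation.MAIN_MENU: None,
--     MenuLocation.PRIVATE_GAME_VIEW: None,
--     MenuLocation.GROUP_GAME_VIEW: None,
-- }
--
-- def get_breadcrumb_path(location: MenuLocation) -> List[MenuLocation]:
--     """Return menu path from root to the provided location."""
--
--     path: List[MenuLocation] = []
--     current: Optional[MenuLocation] = location
--     visited: set[MenuLocation] = set()
--     while current is not None and current not in visited:
--         path.append(current)
--         visited.add(current)
--         current = MENU_HIERARCHY.get(current)
--     path.reverse()
--     return path
-- ===== SOURCE B (Python) =====
-- from enum import Enum
-- from typing import Dict, List, Optional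
--
-- class MenuLocation(str, Enum):
--     """Known menu locations for bot navigation."""
--
--     MAIN_MENU = "main"
--     PRIVATE_GAME_SETUP = "private_setup"
--     PRIVATE_GAME_VIEW = "private_view"
--     STAKE_SELECTION = "stake_select"
--     PLAYER_MANAGEMENT = "player_mgmt"
--     GROUP_GAME_SETUP = "group_setup"
--     GROUP_GAME_VIEW = "group_view"
--     SETTINGS = "settings"
--     LANGUAGE_SELECT = "lang_select"
--
-- MENU_HIERARCHY: Dict[MenuLocation, Optional[MenuLocation]] = {
--     MenuLocation.PRIVATE_GAME_SETUP: MenuLocation.MAIN_MENU,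
--     MenuLocation.STAKE_SELECTION: MenuLocation.PRIVATE_GAME_SETUP,
--     MenuLocation.PLAYER_MANAGEMENT: MenuLocation.PRIVATE_GAME_VIEW,
--     MenuLocation.GROUP_GAME_SETUP: MenuLocation.MAIN_MENU,
--     MenuLocation.SETTINGS: MenuLocation.MAIN_MENU,
--     MenuLocation.LANGUAGE_SELECT: MenuLocation.SETTINGS,
--     MenuLocation.MAIN_MENU: None,
--     MenuLocation.PRIVATE_GAME_VIEW: None,
--     MenuLocation.GROUP_GAME_VIEW: None,
-- }
--
-- def get_breadcrumb_path(location: MenuLocation) -> List[MenuLocation]: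
--     """Return menu path from root to the provided location."""
--
--     parent = MENU_HIERARCHY.get(location)
--     if parent is None:
--         return [location]
--     return get_breadcrumb_path(parent) + [location]
-- ===== Notes on version B (the rewrite author's own statement) =====
-- stated objective: simpler
-- what changed: Replaced the while loop with its path list, visited set and final reverse by a 3-line recursion up the parent chain that builds the path in root-to-leaf order directly (the fixed hierarchy is acyclic, so no cycle guard is needed).
import Mathlib
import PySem

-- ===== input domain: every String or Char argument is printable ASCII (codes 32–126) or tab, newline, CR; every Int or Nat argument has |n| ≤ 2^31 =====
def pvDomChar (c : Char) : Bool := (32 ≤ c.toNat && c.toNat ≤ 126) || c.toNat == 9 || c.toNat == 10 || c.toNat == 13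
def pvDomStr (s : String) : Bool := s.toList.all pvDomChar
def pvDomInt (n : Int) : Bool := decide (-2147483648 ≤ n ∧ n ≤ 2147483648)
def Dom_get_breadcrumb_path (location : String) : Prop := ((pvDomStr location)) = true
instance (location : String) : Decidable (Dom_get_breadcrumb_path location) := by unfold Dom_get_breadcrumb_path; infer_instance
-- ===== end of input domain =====

-- B replaces A's while loop (path list + visited set + final reverse) by direct
-- recursion up the parent chain, building the path in root→leaf order; objective: simpler.

-- ===== PORT A =====
def MENU_HIERARCHY : PySem.Dict String (Option String) :=
  PySem.Dict.mk
    [ ("private_setup", some "main"), ("stake_select", some "private_setup"),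
      ("player_mgmt", some "private_view"), ("group_setup", some "main"),
      ("settings", some "main"), ("lang_select", some "settings"),
      ("main", none), ("private_view", none), ("group_view", none) ]

-- A's while loop; the fuel 10 only makes the loop total: the visited-set guard and the
-- fixed hierarchy mean the Python loop runs at most 5 iterations on any input.
def breadLoop : Nat → Option String → List String → PySem.Set String → List String
  | 0, _, path, _ => path
  | Nat.succ n, cur, path, visited =>
    match cur with
    | none => path
    | some c =>
      if c ∈ visited then path
      else breadLoop n ((MENU_HIERARCHY.get? c).join) (path ++ [c]) (PySem.Set.add visited c)

def get_breadcrumb_path (location : String) : List String :=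
  (breadLoop 10 (some location) [] PySem.Set.empty).reverse

-- ===== PORT B =====
def B_MENU : PySem.Dict String (Option String) :=
  PySem.Dict.mk
    [ ("private_setup", some "main"), ("stake_select", some "private_setup"),
      ("player_mgmt", some "private_view"), ("group_setup", some "main"),
      ("settings", some "main"), ("lang_select", some "settings"),
      ("main", none), ("private_view", none), ("group_view", none) ]

-- MENU_HIERARCHY.get(location) in Source B (None for a missing key or a None value)
def parentOf (location : String) : Option String := (B_MENU.get? location).join

-- depth of a node in the fixed hierarchy; termination measure for B's recursion
def menuRank (s : String) : Nat :=
  if s = "stake_select" ∨ s = "lang_select" then 2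
  else if s = "private_setup" ∨ s = "group_setup" ∨ s = "settings" ∨ s = "player_mgmt" then 1
  else 0

theorem menuRank_parent (s p : String) (h : parentOf s = some p) : menuRank p < menuRank s := by
  simp only [parentOf, B_MENU, PySem.Dict.get?_mk_cons, beq_iff_eq] at h
  split_ifs at h with h1 h2 h3 h4 h5 h6 h7 h8 h9
  all_goals (try (simp [PySem.Dict.get?] at h))
  all_goals (subst_vars; decide)

def get_breadcrumb_path_alt (location : String) : List String :=
  match h : parentOf location with
  | none => [location]
  | some p => get_breadcrumb_path_alt p ++ [location]
termination_by menuRank location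
decreasing_by exact menuRank_parent _ _ h

-- ===== PRECONDITION & SPEC =====
def Spec_get_breadcrumb_path (location : String) (out : List String) : Prop := out = get_breadcrumb_path_alt location
instance (location : String) (out : List String) : Decidable (Spec_get_breadcrumb_path location out) := by unfold Spec_get_breadcrumb_path; infer_instance

-- ===== CLAIM (what is proved, stated in full; the proofs are below) =====
def Claim_equal_get_breadcrumb_path : Prop := ∀ (location : String), Dom_get_breadcrumb_path location → Spec_get_breadcrumb_path location (get_breadcrumb_path location)

-- ===== LEMMAS AND PROOFS =====

theorem alt_of_parent_none (s : String) (h : parentOf s = none) :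
    get_breadcrumb_path_alt s = [s] := by
  rw [get_breadcrumb_path_alt]; split <;> simp_all

theorem alt_of_parent_some (s p : String) (h : parentOf s = some p) :
    get_breadcrumb_path_alt s = get_breadcrumb_path_alt p ++ [s] := by
  rw [get_breadcrumb_path_alt]; split <;> simp_all

theorem equal_unknown (location : String)
    (h1 : ¬ location = "private_setup") (h2 : ¬ location = "stake_select")
    (h3 : ¬ location = "player_mgmt") (h4 : ¬ location = "group_setup")
    (h5 : ¬ location = "settings") (h6 : ¬ location = "lang_select")
    (h7 : ¬ location = "main") (h8 : ¬ location = "private_view")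
    (h9 : ¬ location = "group_view") :
    get_breadcrumb_path location = get_breadcrumb_path_alt location := by
  rw [alt_of_parent_none location (by
    simp [parentOf, B_MENU, PySem.Dict.get?, Ne.symm h1, Ne.symm h2, Ne.symm h3,
      Ne.symm h4, Ne.symm h5, Ne.symm h6, Ne.symm h7, Ne.symm h8, Ne.symm h9])]
  simp [get_breadcrumb_path, breadLoop, MENU_HIERARCHY, PySem.Dict.get?, PySem.Set.empty, Ne.symm h1, Ne.symm h2, Ne.symm h3, Ne.symm h4, Ne.symm h5, Ne.symm h6,
    Ne.symm h7, Ne.symm h8, Ne.symm h9]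

-- B's value at each node of the fixed hierarchy (B's well-founded recursion is not
-- kernel-reducible, so these are unfolded one parent step at a time)
theorem alt_main : get_breadcrumb_path_alt "main" = ["main"] :=
  alt_of_parent_none _ (by decide)
theorem alt_private_view : get_breadcrumb_path_alt "private_view" = ["private_view"] :=
  alt_of_parent_none _ (by decide)
theorem alt_group_view : get_breadcrumb_path_alt "group_view" = ["group_view"] :=
  alt_of_parent_none _ (by decide)
theorem alt_private_setup : get_breadcrumb_path_alt "private_setup" = ["main", "private_setup"] := by
  rw [alt_of_parent_some _ "main" (by decide), alt_main]; rfl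
theorem alt_group_setup : get_breadcrumb_path_alt "group_setup" = ["main", "group_setup"] := by
  rw [alt_of_parent_some _ "main" (by decide), alt_main]; rfl
theorem alt_settings : get_breadcrumb_path_alt "settings" = ["main", "settings"] := by
  rw [alt_of_parent_some _ "main" (by decide), alt_main]; rfl
theorem alt_stake_select : get_breadcrumb_path_alt "stake_select" = ["main", "private_setup", "stake_select"] := by
  rw [alt_of_parent_some _ "private_setup" (by decide), alt_private_setup]; rfl
theorem alt_player_mgmt : get_breadcrumb_path_alt "player_mgmt" = ["private_view", "player_mgmt"] := by
  rw [alt_of_parent_some _ "private_view" (by decide), alt_private_view]; rfl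
theorem alt_lang_select : get_breadcrumb_path_alt "lang_select" = ["main", "settings", "lang_select"] := by
  rw [alt_of_parent_some _ "settings" (by decide), alt_settings]; rfl

-- ===== VERDICT (by name: the statement is the Claim_ definition above) =====
theorem get_breadcrumb_path_spec : Claim_equal_get_breadcrumb_path := by
  intro location _
  unfold Spec_get_breadcrumb_path
  by_cases h1 : location = "private_setup"; · subst h1; rw [alt_private_setup]; decide
  by_cases h2 : location = "stake_select"; · subst h2; rw [alt_stake_select]; decide
  by_cases h3 : location = "player_mgmt"; · subst h3; rw [alt_player_mgmt]; decide
  by_cases h4 : location = "group_setup"; · subst h4; rw [alt_group_setup]; decide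
  by_cases h5 : location = "settings"; · subst h5; rw [alt_settings]; decide
  by_cases h6 : location = "lang_select"; · subst h6; rw [alt_lang_select]; decide
  by_cases h7 : location = "main"; · subst h7; rw [alt_main]; decide
  by_cases h8 : location = "private_view"; · subst h8; rw [alt_private_view]; decide
  by_cases h9 : location = "group_view"; · subst h9; rw [alt_group_view]; decide
  exact equal_unknown location h1 h2 h3 h4 h5 h6 h7 h8 h9
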